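-- pv_equiv track=rewrite | github.com/rwiv/pyutils | pyutils/list_sublist.py | sublist_with_idx
-- ===== SOURCE A (Python) =====
-- from typing import TypeVar
--
-- T = TypeVar("T")
--
-- def sublist_with_idx(lst: list[T], size: int) -> list[list[tuple[int, T]]]:
--     if size <= 0:
--         raise ValueError("n should be greater than 0")
--
--     result = []
--     current = []
--     cnt = 0
--
--     for elem in lst:
--         if len(current) >= size:
--             result.append(current)
--             current = []
--         current.append((cnt, elem))
--         cnt += 1
--
--     if current:
--         result.append(current)
--
--     return result
-- ===== SOURCE B (Python) =====
-- def sublist_with_idx(lst, size):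
--     if size <= 0:
--         raise ValueError("n should be greater than 0")
--     pairs = list(enumerate(lst))
--     return [pairs[i:i + size] for i in range(0, len(pairs), size)]
-- ===== Notes on version B (the rewrite author's own statement) =====
-- stated objective: simpler
-- what changed: B precomputes the full index/value pair list with enumerate and partitions it by strided slicing, replacing A's incremental flush-on-full accumulator loop with its running buffer and counter.
import Mathlib
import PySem

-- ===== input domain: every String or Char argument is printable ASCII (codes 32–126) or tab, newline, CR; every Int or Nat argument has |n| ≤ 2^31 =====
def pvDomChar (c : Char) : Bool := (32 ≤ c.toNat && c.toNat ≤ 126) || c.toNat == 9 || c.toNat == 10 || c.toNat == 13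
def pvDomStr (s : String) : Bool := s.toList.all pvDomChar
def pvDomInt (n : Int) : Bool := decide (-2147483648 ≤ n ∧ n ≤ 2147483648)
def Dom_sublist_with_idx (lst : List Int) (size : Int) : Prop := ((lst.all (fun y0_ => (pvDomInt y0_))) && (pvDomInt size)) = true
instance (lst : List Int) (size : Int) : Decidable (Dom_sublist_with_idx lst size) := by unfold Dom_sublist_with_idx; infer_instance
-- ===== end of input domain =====

-- B builds the full enumerate pair list and partitions it by strided slicing instead of A's flush-on-full accumulator loop (same cost, simpler decomposition).


-- ===== PORT A =====
-- the body of A's for-loop (flush current when full, append (cnt, elem), bump cnt)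
def stepA (size : Int) (st : List (List (Int × Int)) × List (Int × Int) × Int) (elem : Int) :
    List (List (Int × Int)) × List (Int × Int) × Int :=
  let result := st.1
  let current := st.2.1
  let cnt := st.2.2
  let rc :=
    if (current.length : Int) ≥ size then (result ++ [current], ([] : List (Int × Int)))
    else (result, current)
  (rc.1, rc.2 ++ [(cnt, elem)], cnt + 1)

def sublist_with_idx (lst : List Int) (size : Int) : List (List (Int × Int)) :=
  if size ≤ 0 then []  -- Python raises ValueError here; excluded by Pre_
  else
    let st := lst.foldl (stepA size) ([], [], 0)
    if st.2.1 = [] then st.1 else st.1 ++ [st.2.1]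

-- ===== PORT B =====
def sublist_with_idx_alt (lst : List Int) (size : Int) : List (List (Int × Int)) :=
  if size ≤ 0 then []  -- Python raises ValueError here; excluded by Pre_
  else
    let pairs := PySem.List.enumerate lst
    (PySem.List.pyRange 0 (pairs.length : Int) size).map
      (fun i => PySem.List.slice pairs (some i) (some (i + size)))

-- ===== PRECONDITION & SPEC =====
-- Pre_ excludes exactly size ≤ 0, where the Python A raises ValueError
def Pre_sublist_with_idx (lst : List Int) (size : Int) : Prop := 1 ≤ size
instance (lst : List Int) (size : Int) : Decidable (Pre_sublist_with_idx lst size) := by unfold Pre_sublist_with_idx; infer_instance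
def pvWitness_sublist_with_idx : List Int × Int := ([1, 2, 3, 4, 5], 2)

def Spec_sublist_with_idx (lst : List Int) (size : Int) (out : List (List (Int × Int))) : Prop := out = sublist_with_idx_alt lst size
instance (lst : List Int) (size : Int) (out : List (List (Int × Int))) : Decidable (Spec_sublist_with_idx lst size out) := by unfold Spec_sublist_with_idx; infer_instance

-- ===== CLAIM (what is proved, stated in full; the proofs are below) =====
def Claim_equal_sublist_with_idx : Prop := ∀ (lst : List Int) (size : Int), Dom_sublist_with_idx lst size → Pre_sublist_with_idx lst size → Spec_sublist_with_idx lst size (sublist_with_idx lst size)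

-- ===== LEMMAS AND PROOFS =====

-- reference chunking: split a list into consecutive blocks of n elements (last may be shorter)
def chunk (n : Nat) : List (Int × Int) → List (List (Int × Int))
  | [] => []
  | x :: xs => (x :: xs.take (n - 1)) :: chunk n (xs.drop (n - 1))
termination_by l => l.length
decreasing_by simp

lemma chunk_nil (n : Nat) : chunk n [] = [] := by rw [chunk.eq_def]

lemma chunk_cons (n : Nat) (x : Int × Int) (xs : List (Int × Int)) :
    chunk n (x :: xs) = (x :: xs.take (n - 1)) :: chunk n (xs.drop (n - 1)) := by rw [chunk.eq_def]

lemma chunk_full (n : Nat) (cur E : List (Int × Int)) (h : cur.length = n) (hn : 1 ≤ n) :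
    chunk n (cur ++ E) = cur :: chunk n E := by
  cases cur with
  | nil => simp at h; omega
  | cons c cs =>
    simp only [List.cons_append, chunk_cons]
    have hcs : cs.length = n - 1 := by simp at h; omega
    rw [List.take_left' hcs, List.drop_left' hcs]

lemma loopA (size : Int) (n : Nat) (hn : size = (n : Int)) (hpos : 1 ≤ n) :
    ∀ (rest : List Int) (res : List (List (Int × Int))) (cur : List (Int × Int)) (cnt : Int),
      cur.length ≤ n →
      (let st := rest.foldl (stepA size) (res, cur, cnt)
       if st.2.1 = [] then st.1 else st.1 ++ [st.2.1])
      = res ++ chunk n (cur ++ PySem.List.enumerate rest cnt) := by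
  intro rest
  induction rest with
  | nil =>
    intro res cur cnt hle
    simp only [List.foldl_nil, PySem.List.enumerate_nil, List.append_nil]
    cases cur with
    | nil => simp [chunk_nil]
    | cons c cs =>
      have h1 : cs.length ≤ n - 1 := by simp at hle; omega
      simp [chunk_cons, chunk_nil, List.take_of_length_le h1, List.drop_eq_nil_of_le h1]
  | cons e rest ih =>
    intro res cur cnt hle
    rw [List.foldl_cons]
    by_cases hc : cur.length = n
    · have hcond : ((cur.length : Int) ≥ size) := by omega
      have hstep : stepA size (res, cur, cnt) e = (res ++ [cur], [(cnt, e)], cnt + 1) := by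
        simp [stepA, hcond]
      rw [hstep, ih (res ++ [cur]) [(cnt, e)] (cnt + 1) (by simpa using hpos)]
      rw [PySem.List.enumerate_cons, chunk_full n cur _ hc hpos]
      simp
    · have hlt : cur.length < n := by omega
      have hcond : ¬ ((cur.length : Int) ≥ size) := by omega
      have hstep : stepA size (res, cur, cnt) e = (res, cur ++ [(cnt, e)], cnt + 1) := by
        simp [stepA, hcond]
      rw [hstep, ih res (cur ++ [(cnt, e)]) (cnt + 1) (by simp; omega)]
      rw [PySem.List.enumerate_cons]
      simp

lemma pyRange_pos_nil (a b s : Int) (hs : 0 < s) (h : b ≤ a) :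
    PySem.List.pyRange a b s = [] := by
  rw [PySem.List.pyRange_of_pos a b hs, if_neg (by omega)]
  simp

lemma pyRange_pos_cons (a b s : Int) (hs : 0 < s) (hab : a < b) :
    PySem.List.pyRange a b s = a :: PySem.List.pyRange (a + s) b s := by
  rw [PySem.List.pyRange_of_pos a b hs, PySem.List.pyRange_of_pos (a + s) b hs]
  have hdiv : (b - a + s - 1) / s = (b - (a + s) + s - 1) / s + 1 := by
    have : b - a + s - 1 = (b - (a + s) + s - 1) + 1 * s := by ring
    rw [this, Int.add_mul_ediv_right _ _ (by omega : s ≠ 0)]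
  rw [if_pos hab, hdiv]
  by_cases h2 : a + s < b
  · have hnn : 0 ≤ (b - (a + s) + s - 1) / s :=
      Int.ediv_nonneg (by omega) (by omega)
    rw [if_pos h2]
    rw [show ((b - (a + s) + s - 1) / s + 1).toNat = ((b - (a + s) + s - 1) / s).toNat + 1 by omega]
    rw [List.range_succ_eq_map]
    simp only [List.map_cons, List.map_map]
    congr 1
    · simp
    · apply List.map_congr_left
      intro k _
      simp [Function.comp]
      ring
  · have hz : (b - (a + s) + s - 1) / s = 0 := by
      apply Int.ediv_eq_zero_of_lt <;> omega
    rw [if_neg h2, hz]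
    simp

lemma lemB (size : Int) (n : Nat) (hn : size = (n : Int)) (hpos : 1 ≤ n) :
    ∀ (m : Nat) (L : List (Int × Int)) (a : Nat), L.length ≤ a + m →
      (PySem.List.pyRange (a : Int) (L.length : Int) size).map
          (fun i => PySem.List.slice L (some i) (some (i + size)))
        = chunk n (L.drop a) := by
  intro m
  induction m with
  | zero =>
    intro L a h
    rw [pyRange_pos_nil _ _ _ (by omega) (by exact_mod_cast (by omega : L.length ≤ a))]
    rw [List.drop_eq_nil_of_le (by omega)]
    simp [chunk_nil]
  | succ m ih =>
    intro L a h
    by_cases hla : L.length ≤ a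
    · rw [pyRange_pos_nil _ _ _ (by omega) (by exact_mod_cast hla)]
      rw [List.drop_eq_nil_of_le hla]
      simp [chunk_nil]
    · have halt : a < L.length := by omega
      rw [pyRange_pos_cons _ _ _ (by omega) (by exact_mod_cast halt)]
      rw [List.map_cons]
      have hsh : (a : Int) + size = ((a + n : Nat) : Int) := by push_cast [hn]; ring
      rw [hsh, ih L (a + n) (by omega)]
      rw [List.drop_eq_getElem_cons halt]
      rw [chunk_cons]
      have hslice : PySem.List.slice L (some (a : Int)) (some ((a + n : Nat) : Int))
          = (L.drop a).take n := by
        rw [PySem.List.slice_toNat L (by omega) (by omega)]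
        congr 1 <;> omega
      congr 1
      · rw [hslice, List.drop_eq_getElem_cons halt]
        rw [show n = (n - 1) + 1 by omega, List.take_succ_cons]
        simp
      · rw [List.drop_drop, show a + 1 + (n - 1) = a + n by omega]

-- ===== VERDICT (by name: the statement is the Claim_ definition above) =====
theorem sublist_with_idx_spec : Claim_equal_sublist_with_idx := by
  intro lst size _ hpre
  unfold Spec_sublist_with_idx sublist_with_idx sublist_with_idx_alt
  have hp1 : 1 ≤ size := hpre
  have hneg : ¬ size ≤ 0 := by omega
  rw [if_neg hneg, if_neg hneg]
  set n := size.toNat with hn'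
  have hn : size = (n : Int) := by omega
  have hpos : 1 ≤ n := by omega
  have hA := loopA size n hn hpos lst [] [] 0 (by simp)
  simp only [List.nil_append] at hA
  rw [hA]
  exact (lemB size n hn hpos (PySem.List.enumerate lst).length (PySem.List.enumerate lst) 0
    (by omega)).symm
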